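-- pv_equiv track=rewrite | github.com/KJSui/leetcode-2020 | maxdistanceKframstream.py | sortFrameGoogle
-- ===== SOURCE A (Python) =====
-- import heapq
--
-- def sortFrameGoogle(array, K):
--     queue = []
--     res = []
--     start = 0
--     while start < len(array):
--         if len(queue) < K:
--             heapq.heappush(queue, array[start])
--         else:
--             res.append(heapq.heappop(queue))
--             heapq.heappush(queue, array[start])
--         start += 1
--
--     while len(queue):
--         res.append(heapq.heappop(queue))
--     return res
-- ===== SOURCE B (Python) =====
-- def sortFrameGoogle(array, K):
--     window = []
--     res = []
--     for x in array:
--         if len(window) >= K: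
--             v = min(window)
--             window.remove(v)
--             res.append(v)
--         window.append(x)
--     res.extend(sorted(window))
--     return res
-- ===== Notes on version B (the rewrite author's own statement) =====
-- stated objective: simpler
-- what changed: Replaces the size-K binary heap with a plain unsorted window list: each step extracts min(window) by a linear scan and removes its first occurrence, and the leftover window is sorted once at the end.
import Mathlib
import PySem

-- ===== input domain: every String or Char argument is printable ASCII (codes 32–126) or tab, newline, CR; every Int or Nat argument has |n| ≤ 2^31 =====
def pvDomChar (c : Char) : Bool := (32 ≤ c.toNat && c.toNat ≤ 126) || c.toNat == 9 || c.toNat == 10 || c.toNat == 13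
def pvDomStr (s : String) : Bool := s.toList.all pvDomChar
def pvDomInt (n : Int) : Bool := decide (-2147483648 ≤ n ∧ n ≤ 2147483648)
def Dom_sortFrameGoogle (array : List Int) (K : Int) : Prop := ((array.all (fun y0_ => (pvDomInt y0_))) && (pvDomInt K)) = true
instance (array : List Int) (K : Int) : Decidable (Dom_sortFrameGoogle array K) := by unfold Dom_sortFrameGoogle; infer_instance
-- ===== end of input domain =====

-- B replaces A's size-K binary heap with a plain unsorted window list (linear min scan +
-- remove, final sort) for simplicity; proved to return the same list wherever A returns.


-- ===== PORT A =====
-- heapq is modelled by a sorted-list priority queue (heappush = ordered insert,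
-- heappop = head): exact for every value A ever observes, since heapq.heappop always
-- returns a minimum of the heap's contents and equal Ints are indistinguishable.
def pvHeappush (q : List Int) (x : Int) : List Int := List.orderedInsert (· ≤ ·) x q

def pvHeappop? (q : List Int) : Option (Int × List Int) :=
  match q with
  | [] => none            -- heappop on an empty heap: IndexError
  | h :: t => some (h, t)

-- the final 'while len(queue): res.append(heapq.heappop(queue))'
def sortFrameGoogleDrain (queue res : List Int) : List Int :=
  match queue with
  | [] => res
  | h :: t => sortFrameGoogleDrain t (res ++ [h])

-- the main 'while start < len(array)' loop
def sortFrameGoogleLoop (array : List Int) (K : Int) (start : Nat) (queue res : List Int) : List Int :=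
  if h : start < array.length then
    if (queue.length : Int) < K then
      sortFrameGoogleLoop array K (start + 1) (pvHeappush queue array[start]) res
    else
      match pvHeappop? queue with
      | none => res        -- IndexError (only reachable when K ≤ 0; excluded by Pre_)
      | some (m, q') =>
          sortFrameGoogleLoop array K (start + 1) (pvHeappush q' array[start]) (res ++ [m])
  else
    sortFrameGoogleDrain queue res
termination_by array.length - start

def sortFrameGoogle (array : List Int) (K : Int) : List Int :=
  sortFrameGoogleLoop array K 0 [] []

-- ===== PORT B =====
def sortFrameGoogleAltGo (K : Int) : List Int → List Int → List Int → List Int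
  | [], window, res => res ++ PySem.List.sorted window (fun y => y) false
  | x :: rest, window, res =>
      if K ≤ (window.length : Int) then
        match PySem.List.min? window (fun y => y) with
        | none => res      -- min([]): ValueError (only reachable when K ≤ 0; excluded by Pre_)
        | some v =>
            match PySem.List.remove? window v with
            | none => res  -- unreachable: v ∈ window
            | some w => sortFrameGoogleAltGo K rest (w ++ [x]) (res ++ [v])
      else
        sortFrameGoogleAltGo K rest (window ++ [x]) res

def sortFrameGoogle_alt (array : List Int) (K : Int) : List Int :=
  sortFrameGoogleAltGo K array [] []

-- ===== PRECONDITION & SPEC =====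
-- Pre_ excludes exactly the inputs where Python A raises: with K ≤ 0 and a nonempty
-- array, A's first iteration calls heappop on the empty heap (IndexError).
def Pre_sortFrameGoogle (array : List Int) (K : Int) : Prop := array = [] ∨ 1 ≤ K
instance (array : List Int) (K : Int) : Decidable (Pre_sortFrameGoogle array K) := by
  unfold Pre_sortFrameGoogle; infer_instance

def pvWitness_sortFrameGoogle : List Int × Int := ([3, 1, 2, 1], 2)

def Spec_sortFrameGoogle (array : List Int) (K : Int) (out : List Int) : Prop := out = sortFrameGoogle_alt array K
instance (array : List Int) (K : Int) (out : List Int) : Decidable (Spec_sortFrameGoogle array K out) := by unfold Spec_sortFrameGoogle; infer_instance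

-- ===== CLAIM (what is proved, stated in full; the proofs are below) =====
def Claim_equal_sortFrameGoogle : Prop := ∀ (array : List Int) (K : Int), Dom_sortFrameGoogle array K → Pre_sortFrameGoogle array K → Spec_sortFrameGoogle array K (sortFrameGoogle array K)

-- ===== LEMMAS AND PROOFS =====

theorem drain_eq_append (queue res : List Int) :
    sortFrameGoogleDrain queue res = res ++ queue := by
  induction queue generalizing res with
  | nil => simp [sortFrameGoogleDrain]
  | cons h t ih => simp [sortFrameGoogleDrain, ih]

-- loop invariant: A's heap (a sorted list) is a permutation of B's window
theorem loop_eq_altGo (array : List Int) (K : Int) (hK : 1 ≤ K) :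
    ∀ (start : Nat) (queue window res : List Int),
      List.Pairwise (· ≤ ·) queue → queue.Perm window →
      sortFrameGoogleLoop array K start queue res
        = sortFrameGoogleAltGo K (array.drop start) window res := by
  suffices H : ∀ (n start : Nat), array.length - start = n →
      ∀ (queue window res : List Int),
        List.Pairwise (· ≤ ·) queue → queue.Perm window →
        sortFrameGoogleLoop array K start queue res
          = sortFrameGoogleAltGo K (array.drop start) window res by
    intro start; exact H _ start rfl
  intro n
  induction n using Nat.strongRecOn with
  | _ n ih =>
  intro start hn queue window res hs hp
  by_cases h : start < array.length
  · have hdrop : array.drop start = array[start] :: array.drop (start + 1) :=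
      List.drop_eq_getElem_cons h
    have hlen : queue.length = window.length := hp.length_eq
    rw [sortFrameGoogleLoop, dif_pos h, hdrop]
    by_cases hb : (queue.length : Int) < K
    · -- push branch on both sides
      have hcond : ¬ K ≤ ((window.length : Nat) : Int) := by omega
      rw [if_pos hb, sortFrameGoogleAltGo, if_neg hcond]
      have := ih (array.length - (start + 1)) (by omega) (start + 1) rfl
        (pvHeappush queue array[start])
        (window ++ [array[start]]) res
        (List.Pairwise.orderedInsert _ _ hs)
        ((List.perm_orderedInsert _ _ _).trans
          ((hp.cons array[start]).trans (List.perm_append_singleton _ _).symm))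
      simpa [pvHeappush] using this
    · -- pop-then-push branch
      have hq : queue ≠ [] := by
        intro hnil
        subst hnil
        simp only [List.length_nil, Nat.cast_zero] at hb
        omega
      obtain ⟨hd, tl, rfl⟩ := List.exists_cons_of_ne_nil hq
      have hw : window ≠ [] := by
        intro hnil; subst hnil; simp at hlen
      obtain ⟨v, hv⟩ : ∃ v, PySem.List.min? window (fun y => y) = some v := by
        cases hmv : PySem.List.min? window (fun y => y) with
        | none => exact absurd ((PySem.List.min?_eq_none_iff window _).mp hmv) hw
        | some v => exact ⟨v, rfl⟩
      have hvmem : v ∈ window := PySem.List.min?_mem hv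
      have hvmin : ∀ y ∈ window, v ≤ y := PySem.List.min?_isMin hv
      have hhd_le : ∀ y ∈ (hd :: tl : List Int), hd ≤ y := by
        intro y hy
        rcases List.mem_cons.mp hy with rfl | hy'
        · exact le_refl _
        · exact (List.pairwise_cons.mp hs).1 y hy'
      have hvhd : v = hd := le_antisymm
        (hvmin hd (hp.mem_iff.mp (List.mem_cons_self)))
        (hhd_le v (hp.mem_iff.mpr hvmem))
      subst hvhd
      have hcond : K ≤ ((window.length : Nat) : Int) := by omega
      rw [if_neg hb, sortFrameGoogleAltGo, if_pos hcond]
      simp only [pvHeappop?, hv, PySem.List.remove?_eq_some_erase window v hvmem]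
      have hperm' : tl.Perm (window.erase v) := by
        have := hp.erase v
        rwa [List.erase_cons_head] at this
      have := ih (array.length - (start + 1)) (by omega) (start + 1) rfl
        (pvHeappush tl array[start])
        (window.erase v ++ [array[start]]) (res ++ [v])
        (List.Pairwise.orderedInsert _ _ (List.pairwise_cons.mp hs).2)
        ((List.perm_orderedInsert _ _ _).trans
          ((hperm'.cons array[start]).trans (List.perm_append_singleton _ _).symm))
      simpa [pvHeappush] using this
  · rw [sortFrameGoogleLoop, dif_neg h, List.drop_eq_nil_of_le (by omega),
      sortFrameGoogleAltGo, drain_eq_append,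
      PySem.List.sorted_id_eq_of_perm_of_pairwise window queue hp hs]

-- ===== VERDICT (by name: the statement is the Claim_ definition above) =====
theorem sortFrameGoogle_spec : Claim_equal_sortFrameGoogle := by
  intro array K _ hpre
  unfold Spec_sortFrameGoogle sortFrameGoogle sortFrameGoogle_alt
  rcases hpre with rfl | hK
  · simp [sortFrameGoogleLoop, sortFrameGoogleDrain, sortFrameGoogleAltGo, PySem.List.sorted]
  · simpa using loop_eq_altGo array K hK 0 [] [] [] (List.Pairwise.nil) (List.Perm.refl _)
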